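-- pv_equiv track=rewrite | github.com/samarpro/villani-code | villani_code/interactive.py | _path_from_unified_diff
-- ===== SOURCE A (Python) =====
-- def _path_from_unified_diff(unified_diff: str) -> str:
--     for line in unified_diff.splitlines():
--         if line.startswith("+++ "):
--             target = line[4:].strip().split("\t", 1)[0]
--             if target.startswith("b/"):
--                 target = target[2:]
--             if target != "/dev/null":
--                 return target
--     for line in unified_diff.splitlines():
--         if line.startswith("--- "):
--             source = line[4:].strip().split("\t", 1)[0]
--             if source.startswith("a/"):
--                 source = source[2:]
--             if source != "/dev/null":
--                 return source
--     return ""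
-- ===== SOURCE B (Python) =====
-- def _candidate(line, drop_prefix):
--     path = line[4:].strip().split("\t", 1)[0]
--     if path.startswith(drop_prefix):
--         path = path[2:]
--     return path
--
--
-- def _path_from_unified_diff(unified_diff: str) -> str:
--     # single pass: remember the first valid '+++' and first valid '---' path
--     target = None
--     source = None
--     for line in unified_diff.splitlines():
--         if target is None and line.startswith("+++ "):
--             path = _candidate(line, "b/")
--             if path != "/dev/null":
--                 target = path
--         if source is None and line.startswith("--- "):
--             path = _candidate(line, "a/")
--             if path != "/dev/null":
--                 source = path
--     if target is not None:
--         return target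
--     if source is not None:
--         return source
--     return ""
-- ===== Notes on version B (the rewrite author's own statement) =====
-- stated objective: alternative
-- what changed: Replaces A's two full passes over splitlines (one for '+++ ', then one for '--- ') by a single fused scan that records the first valid target and first valid source path and resolves the target-over-source preference after the loop.
import Mathlib
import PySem

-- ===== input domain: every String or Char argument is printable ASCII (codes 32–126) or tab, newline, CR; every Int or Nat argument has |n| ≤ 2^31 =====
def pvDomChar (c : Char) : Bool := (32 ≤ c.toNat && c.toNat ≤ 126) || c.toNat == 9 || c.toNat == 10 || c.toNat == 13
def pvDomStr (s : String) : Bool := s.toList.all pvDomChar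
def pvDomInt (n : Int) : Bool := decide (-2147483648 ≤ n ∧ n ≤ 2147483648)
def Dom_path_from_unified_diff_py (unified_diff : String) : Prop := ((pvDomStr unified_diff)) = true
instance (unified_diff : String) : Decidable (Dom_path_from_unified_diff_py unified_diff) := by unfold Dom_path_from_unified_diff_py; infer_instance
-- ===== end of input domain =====

-- B is an alternative decomposition: a single fused scan recording the first valid
-- '+++ ' and '--- ' paths, instead of A's two separate passes over the lines.

-- ===== PORT A =====
-- first loop of A: return the first valid '+++ ' path ('\t' has a nonempty separator,
-- so splitMax? is always 'some' of a nonempty list; getD/headD are exact)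
def pvA1 : List String → Option String
  | [] => none
  | line :: rest =>
    if PySem.Str.startswith line "+++ " then
      let target := ((PySem.Str.splitMax? (PySem.Str.strip (PySem.Str.slice line (some 4) none)) "\t" 1).getD []).headD ""
      let target := if PySem.Str.startswith target "b/" then PySem.Str.slice target (some 2) none else target
      if target ≠ "/dev/null" then some target else pvA1 rest
    else pvA1 rest

-- second loop of A: the first valid '--- ' path
def pvA2 : List String → Option String
  | [] => none
  | line :: rest =>
    if PySem.Str.startswith line "--- " then
      let source := ((PySem.Str.splitMax? (PySem.Str.strip (PySem.Str.slice line (some 4) none)) "\t" 1).getD []).headD ""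
      let source := if PySem.Str.startswith source "a/" then PySem.Str.slice source (some 2) none else source
      if source ≠ "/dev/null" then some source else pvA2 rest
    else pvA2 rest

def path_from_unified_diff_py (unified_diff : String) : String :=
  match pvA1 (PySem.Str.splitlines unified_diff) with
  | some t => t
  | none =>
    match pvA2 (PySem.Str.splitlines unified_diff) with
    | some s => s
    | none => ""

-- ===== PORT B =====
-- helper _candidate of Source B
def pvCandidate (line dropPrefix : String) : String :=
  let path := ((PySem.Str.splitMax? (PySem.Str.strip (PySem.Str.slice line (some 4) none)) "\t" 1).getD []).headD ""
  if PySem.Str.startswith path dropPrefix then PySem.Str.slice path (some 2) none else path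

-- one iteration of Source B's fused loop over (target, source)
def pvStepB (st : Option String × Option String) (line : String) : Option String × Option String :=
  let st :=
    if st.1.isNone && PySem.Str.startswith line "+++ " then
      let path := pvCandidate line "b/"
      if path ≠ "/dev/null" then (some path, st.2) else st
    else st
  if st.2.isNone && PySem.Str.startswith line "--- " then
    let path := pvCandidate line "a/"
    if path ≠ "/dev/null" then (st.1, some path) else st
  else st

def path_from_unified_diff_py_alt (unified_diff : String) : String :=
  let st := (PySem.Str.splitlines unified_diff).foldl pvStepB (none, none)
  match st.1 with
  | some t => t
  | none =>
    match st.2 with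
    | some s => s
    | none => ""

-- ===== PRECONDITION & SPEC =====
def Spec_path_from_unified_diff_py (unified_diff : String) (out : String) : Prop := out = path_from_unified_diff_py_alt unified_diff
instance (unified_diff : String) (out : String) : Decidable (Spec_path_from_unified_diff_py unified_diff out) := by unfold Spec_path_from_unified_diff_py; infer_instance

-- ===== CLAIM (what is proved, stated in full; the proofs are below) =====
def Claim_equal_path_from_unified_diff_py : Prop := ∀ (unified_diff : String), Dom_path_from_unified_diff_py unified_diff → Spec_path_from_unified_diff_py unified_diff (path_from_unified_diff_py unified_diff)

-- ===== LEMMAS AND PROOFS =====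

-- the candidate a single line contributes (none if no match or /dev/null)
def pvFirst (line pre drop : String) : Option String :=
  if PySem.Str.startswith line pre ∧ pvCandidate line drop ≠ "/dev/null" then
    some (pvCandidate line drop)
  else none

theorem pvA1_cons (line : String) (rest : List String) :
    pvA1 (line :: rest) = (pvFirst line "+++ " "b/").or (pvA1 rest) := by
  have h : pvA1 (line :: rest) =
      if PySem.Str.startswith line "+++ " then
        (if pvCandidate line "b/" ≠ "/dev/null" then some (pvCandidate line "b/") else pvA1 rest)
      else pvA1 rest := rfl
  rw [h]; unfold pvFirst
  by_cases h1 : PySem.Str.startswith line "+++ " = true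
  · rw [if_pos h1]
    by_cases h2 : pvCandidate line "b/" ≠ "/dev/null"
    · rw [if_pos h2, if_pos ⟨h1, h2⟩, Option.some_or]
    · have hn : ¬(PySem.Str.startswith line "+++ " = true ∧ pvCandidate line "b/" ≠ "/dev/null") :=
        fun hc => h2 hc.2
      rw [if_neg h2, if_neg hn, Option.none_or]
  · have hn : ¬(PySem.Str.startswith line "+++ " = true ∧ pvCandidate line "b/" ≠ "/dev/null") :=
      fun hc => h1 hc.1
    rw [if_neg h1, if_neg hn, Option.none_or]

theorem pvA2_cons (line : String) (rest : List String) :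
    pvA2 (line :: rest) = (pvFirst line "--- " "a/").or (pvA2 rest) := by
  have h : pvA2 (line :: rest) =
      if PySem.Str.startswith line "--- " then
        (if pvCandidate line "a/" ≠ "/dev/null" then some (pvCandidate line "a/") else pvA2 rest)
      else pvA2 rest := rfl
  rw [h]; unfold pvFirst
  by_cases h1 : PySem.Str.startswith line "--- " = true
  · rw [if_pos h1]
    by_cases h2 : pvCandidate line "a/" ≠ "/dev/null"
    · rw [if_pos h2, if_pos ⟨h1, h2⟩, Option.some_or]
    · have hn : ¬(PySem.Str.startswith line "--- " = true ∧ pvCandidate line "a/" ≠ "/dev/null") :=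
        fun hc => h2 hc.2
      rw [if_neg h2, if_neg hn, Option.none_or]
  · have hn : ¬(PySem.Str.startswith line "--- " = true ∧ pvCandidate line "a/" ≠ "/dev/null") :=
      fun hc => h1 hc.1
    rw [if_neg h1, if_neg hn, Option.none_or]

-- the two stages of one iteration of B's fused loop (definitionally the body of pvStepB)
def pvFst (st : Option String × Option String) (line : String) : Option String × Option String :=
  if st.1.isNone && PySem.Str.startswith line "+++ " then
    (if pvCandidate line "b/" ≠ "/dev/null" then (some (pvCandidate line "b/"), st.2) else st)
  else st

def pvSnd (st : Option String × Option String) (line : String) : Option String × Option String :=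
  if st.2.isNone && PySem.Str.startswith line "--- " then
    (if pvCandidate line "a/" ≠ "/dev/null" then (st.1, some (pvCandidate line "a/")) else st)
  else st

theorem pvFst_eq (t? s? : Option String) (line : String) :
    pvFst (t?, s?) line = (t?.or (pvFirst line "+++ " "b/"), s?) := by
  have e1 : pvFirst line "+++ " "b/" =
      if PySem.Str.startswith line "+++ " ∧ pvCandidate line "b/" ≠ "/dev/null" then
        some (pvCandidate line "b/") else none := rfl
  unfold pvFst
  cases t? with
  | none =>
    by_cases hs : PySem.Str.startswith line "+++ " = true
    · have hb : (Option.isNone (none : Option String) && PySem.Str.startswith line "+++ ") = true := by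
        rw [Option.isNone_none, Bool.true_and]; exact hs
      rw [if_pos hb]
      by_cases hd : pvCandidate line "b/" ≠ "/dev/null"
      · rw [if_pos hd, e1, if_pos ⟨hs, hd⟩]; rfl
      · have hn : ¬(PySem.Str.startswith line "+++ " = true ∧ pvCandidate line "b/" ≠ "/dev/null") :=
          fun hc => hd hc.2
        rw [if_neg hd, e1, if_neg hn]; rfl
    · have hb : ¬((Option.isNone (none : Option String) && PySem.Str.startswith line "+++ ") = true) := by
        rw [Option.isNone_none, Bool.true_and]; exact hs
      have hn : ¬(PySem.Str.startswith line "+++ " = true ∧ pvCandidate line "b/" ≠ "/dev/null") :=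
        fun hc => hs hc.1
      rw [if_neg hb, e1, if_neg hn]; rfl
  | some t =>
    have hb : ¬((Option.isNone (some t) && PySem.Str.startswith line "+++ ") = true) := by
      rw [Option.isNone_some, Bool.false_and]; exact Bool.false_ne_true
    rw [if_neg hb, Option.some_or]

theorem pvSnd_eq (t? s? : Option String) (line : String) :
    pvSnd (t?, s?) line = (t?, s?.or (pvFirst line "--- " "a/")) := by
  have e2 : pvFirst line "--- " "a/" =
      if PySem.Str.startswith line "--- " ∧ pvCandidate line "a/" ≠ "/dev/null" then
        some (pvCandidate line "a/") else none := rfl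
  unfold pvSnd
  cases s? with
  | none =>
    by_cases hs : PySem.Str.startswith line "--- " = true
    · have hb : (Option.isNone (none : Option String) && PySem.Str.startswith line "--- ") = true := by
        rw [Option.isNone_none, Bool.true_and]; exact hs
      rw [if_pos hb]
      by_cases hd : pvCandidate line "a/" ≠ "/dev/null"
      · rw [if_pos hd, e2, if_pos ⟨hs, hd⟩]; rfl
      · have hn : ¬(PySem.Str.startswith line "--- " = true ∧ pvCandidate line "a/" ≠ "/dev/null") :=
          fun hc => hd hc.2
        rw [if_neg hd, e2, if_neg hn]; rfl
    · have hb : ¬((Option.isNone (none : Option String) && PySem.Str.startswith line "--- ") = true) := by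
        rw [Option.isNone_none, Bool.true_and]; exact hs
      have hn : ¬(PySem.Str.startswith line "--- " = true ∧ pvCandidate line "a/" ≠ "/dev/null") :=
        fun hc => hs hc.1
      rw [if_neg hb, e2, if_neg hn]; rfl
  | some s =>
    have hb : ¬((Option.isNone (some s) && PySem.Str.startswith line "--- ") = true) := by
      rw [Option.isNone_some, Bool.false_and]; exact Bool.false_ne_true
    rw [if_neg hb, Option.some_or]

-- one step of B's fused loop, in terms of the per-line candidates
theorem pvStepB_eq (t? s? : Option String) (line : String) :
    pvStepB (t?, s?) line =
      (t?.or (pvFirst line "+++ " "b/"), s?.or (pvFirst line "--- " "a/")) := by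
  have h : pvStepB (t?, s?) line = pvSnd (pvFst (t?, s?) line) line := rfl
  rw [h, pvFst_eq, pvSnd_eq]

-- B's fold computes the pair of first valid matches, seeded by whatever is already set
theorem foldl_pvStepB (lines : List String) (t? s? : Option String) :
    lines.foldl pvStepB (t?, s?) = (t?.or (pvA1 lines), s?.or (pvA2 lines)) := by
  induction lines generalizing t? s? with
  | nil => cases t? <;> cases s? <;> simp [pvA1, pvA2]
  | cons line rest ih =>
    rw [List.foldl_cons, pvStepB_eq, ih, pvA1_cons, pvA2_cons, Option.or_assoc, Option.or_assoc]

-- ===== VERDICT (by name: the statement is the Claim_ definition above) =====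
theorem path_from_unified_diff_py_spec : Claim_equal_path_from_unified_diff_py := by
  intro s _
  unfold Spec_path_from_unified_diff_py path_from_unified_diff_py path_from_unified_diff_py_alt
  rw [foldl_pvStepB]
  cases pvA1 (PySem.Str.splitlines s) <;> cases pvA2 (PySem.Str.splitlines s) <;> rfl
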